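-- pv_equiv track=rewrite | github.com/MC-intel/BlackJack-Sim | CreateDecks.py | generate_multiple_lists
-- ===== SOURCE A (Python) =====
-- def generate_list(number, count):
--     return [number] * count
--
-- def generate_multiple_lists(num_lists):
--     # Create a dictionary to hold the generated lists
--     all_lists = {}
--
--     # Generate lists of four numbers
--     for i in range(num_lists):
--         current_list = []
--         for j in range(2, 12):
--             if j == 10:
--                 current_list += [10] * 16
--             else:
--                 current_list += generate_list(j, 1) * 4
--         all_lists[i] = current_list
--
--     return all_lists
-- ===== SOURCE B (Python) =====
-- def generate_multiple_lists(num_lists):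
--     # Deck as a multiset: four of every rank 2..11 plus twelve extra tens,
--     # put into rank order by sorting; each key gets its own copy.
--     deck = sorted(4 * list(range(2, 12)) + 12 * [10])
--     return {i: list(deck) for i in range(num_lists)}
-- ===== Notes on version B (the rewrite author's own statement) =====
-- stated objective: alternative
-- what changed: B specifies the deck as a multiset (four of each rank 2..11 plus twelve extra tens) and sorts it into rank order once, then hands each key a fresh copy via a dict comprehension, instead of A rebuilding the deck for every key with a nested rank loop, a j==10 branch and the [j]*1*4 detour through generate_list.
import Mathlib
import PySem

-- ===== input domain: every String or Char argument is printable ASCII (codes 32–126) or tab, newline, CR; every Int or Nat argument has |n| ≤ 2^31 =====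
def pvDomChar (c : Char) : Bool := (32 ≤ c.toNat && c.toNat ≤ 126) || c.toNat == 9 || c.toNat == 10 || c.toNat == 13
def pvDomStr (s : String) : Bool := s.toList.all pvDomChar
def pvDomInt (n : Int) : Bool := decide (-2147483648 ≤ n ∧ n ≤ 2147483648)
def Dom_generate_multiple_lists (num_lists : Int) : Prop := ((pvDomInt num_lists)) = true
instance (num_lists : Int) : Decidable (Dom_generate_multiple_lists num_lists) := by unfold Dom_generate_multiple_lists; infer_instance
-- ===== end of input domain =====

-- B builds the deck once as a sorted multiset (4x each rank 2..11 + 12 extra tens) and maps copies over the keys, instead of A's per-key nested reconstruction; objective: alternative.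


-- ===== PORT A =====
def generate_list (number : Int) (count : Int) : List Int :=
  List.replicate count.toNat number  -- [number] * count

-- Python `lst * 4` on a list
def pyListMul (xs : List Int) (n : Nat) : List Int :=
  (List.replicate n xs).flatten

def generate_multiple_lists (num_lists : Int) : List (Int × List Int) :=
  ((PySem.List.pyRange 0 num_lists 1).foldl (fun all_lists i =>
      let current_list := (PySem.List.pyRange 2 12 1).foldl (fun cur j =>
          if j == 10 then cur ++ List.replicate 16 (10 : Int)
          else cur ++ pyListMul (generate_list j 1) 4) ([] : List Int)
      all_lists.insert i current_list)
    (PySem.Dict.empty : PySem.Dict Int (List Int))).items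

-- ===== PORT B =====
-- deck = sorted(4 * list(range(2, 12)) + 12 * [10])
def pvDeck : List Int :=
  PySem.List.sorted
    ((List.replicate 4 (PySem.List.pyRange 2 12 1)).flatten ++ List.replicate 12 (10 : Int))
    (fun x => x) false

def generate_multiple_lists_alt (num_lists : Int) : List (Int × List Int) :=
  (PySem.List.pyRange 0 num_lists 1).map (fun i => (i, pvDeck))

-- ===== PRECONDITION & SPEC =====
def Spec_generate_multiple_lists (num_lists : Int) (out : List (Int × List Int)) : Prop := out = generate_multiple_lists_alt num_lists
instance (num_lists : Int) (out : List (Int × List Int)) : Decidable (Spec_generate_multiple_lists num_lists out) := by unfold Spec_generate_multiple_lists; infer_instance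

-- ===== CLAIM (what is proved, stated in full; the proofs are below) =====
def Claim_equal_generate_multiple_lists : Prop := ∀ (num_lists : Int), Dom_generate_multiple_lists num_lists → Spec_generate_multiple_lists num_lists (generate_multiple_lists num_lists)

-- ===== LEMMAS AND PROOFS =====

-- A's per-key rebuilt deck equals B's sorted-multiset deck (both closed lists).
theorem pvDeck_eq :
    (PySem.List.pyRange 2 12 1).foldl (fun cur j =>
        if j == 10 then cur ++ List.replicate 16 (10 : Int)
        else cur ++ pyListMul (generate_list j 1) 4) ([] : List Int) = pvDeck := by
  decide

-- ===== VERDICT (by name: the statement is the Claim_ definition above) =====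
theorem generate_multiple_lists_spec : Claim_equal_generate_multiple_lists := by
  intro n _
  unfold Spec_generate_multiple_lists generate_multiple_lists generate_multiple_lists_alt
  rw [pvDeck_eq]
  have h := PySem.Dict.items_foldl_insert_fresh (l := PySem.List.pyRange 0 n 1)
      (k := fun i => i) (v := fun _ => pvDeck) (d := PySem.Dict.empty)
      (fun a _ => PySem.Dict.contains_empty a)
      (by simpa using PySem.List.nodup_pyRange_one 0 n)
  simpa using h
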